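-- pv_equiv track=rewrite | github.com/brianpaden/truthgraph | tests/accuracy/test_validation_with_data.py | simulate_predictions
-- ===== SOURCE A (Python) =====
-- from typing import List, Tuple
--
-- def simulate_predictions(verdicts: List[str]) -> List[str]:
--     """Simulate predictions for validation.
--
--     Args:
--         verdicts: Expected verdicts
--
--     Returns:
--         List of predicted verdicts
--     """
--     predictions = []
--     for i, verdict in enumerate(verdicts):
--         # Introduce errors at intervals for realistic evaluation
--         if i % 4 == 0:
--             if verdict == "SUPPORTED":
--                 predictions.append("REFUTED")
--             elif verdict == "REFUTED":
--                 predictions.append("INSUFFICIENT")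
--             else:
--                 predictions.append("SUPPORTED")
--         else:
--             predictions.append(verdict)
--
--     return predictions
-- ===== SOURCE B (Python) =====
-- def _rotate(verdict):
--     if verdict == "SUPPORTED":
--         return "REFUTED"
--     if verdict == "REFUTED":
--         return "INSUFFICIENT"
--     return "SUPPORTED"
--
--
-- def simulate_predictions(verdicts):
--     """Simulate predictions for validation: copy the input, then overwrite
--     only the strided error positions (every 4th index) with the rotated verdict."""
--     predictions = list(verdicts)
--     for i in range(0, len(verdicts), 4):
--         predictions[i] = _rotate(verdicts[i])
--     return predictions
-- ===== Notes on version B (the rewrite author's own statement) =====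
-- stated objective: simpler
-- what changed: Instead of a full pass appending element by element with an i % 4 guard, B copies the input list in one step and then loops only over the strided error positions range(0, len, 4), overwriting each with the rotated verdict.
import Mathlib
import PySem

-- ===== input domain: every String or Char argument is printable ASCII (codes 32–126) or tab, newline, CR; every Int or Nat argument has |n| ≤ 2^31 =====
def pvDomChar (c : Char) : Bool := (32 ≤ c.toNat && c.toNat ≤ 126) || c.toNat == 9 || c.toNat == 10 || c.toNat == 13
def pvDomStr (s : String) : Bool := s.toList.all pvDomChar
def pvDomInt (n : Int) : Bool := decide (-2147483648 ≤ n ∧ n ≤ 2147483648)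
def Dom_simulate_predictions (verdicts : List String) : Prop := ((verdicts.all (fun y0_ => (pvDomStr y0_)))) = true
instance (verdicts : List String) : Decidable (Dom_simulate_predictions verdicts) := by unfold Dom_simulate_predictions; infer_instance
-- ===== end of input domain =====

-- B replaces A's full pass with an i % 4 guard by a copy of the input plus a stride-4 overwrite loop (same O(n) cost, plainer structure).


-- ===== PORT A =====
-- literal transliteration: enumerate + per-element branch, appending to an accumulator
def simulate_predictions (verdicts : List String) : List String :=
  (PySem.List.enumerate verdicts 0).foldl
    (fun predictions iv =>
      if PySem.Int.mod iv.1 4 = 0 then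
        if iv.2 = "SUPPORTED" then predictions ++ ["REFUTED"]
        else if iv.2 = "REFUTED" then predictions ++ ["INSUFFICIENT"]
        else predictions ++ ["SUPPORTED"]
      else predictions ++ [iv.2])
    []

-- ===== PORT B =====
-- helper _rotate from Source B
def pvRotate (verdict : String) : String :=
  if verdict = "SUPPORTED" then "REFUTED"
  else if verdict = "REFUTED" then "INSUFFICIENT"
  else "SUPPORTED"

-- copy of the input, then overwrite the stride-4 positions
def simulate_predictions_alt (verdicts : List String) : List String :=
  (PySem.List.pyRange 0 (verdicts.length : Int) 4).foldl
    (fun predictions i => predictions.set i.toNat (pvRotate (PySem.List.pyGetD verdicts i "")))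
    verdicts

-- ===== PRECONDITION & SPEC =====
def Spec_simulate_predictions (verdicts : List String) (out : List String) : Prop := out = simulate_predictions_alt verdicts
instance (verdicts : List String) (out : List String) : Decidable (Spec_simulate_predictions verdicts out) := by unfold Spec_simulate_predictions; infer_instance

-- ===== CLAIM (what is proved, stated in full; the proofs are below) =====
def Claim_equal_simulate_predictions : Prop := ∀ (verdicts : List String), Dom_simulate_predictions verdicts → Spec_simulate_predictions verdicts (simulate_predictions verdicts)

-- ===== LEMMAS AND PROOFS =====

-- the common specification: element j of the result is vs[j], rotated when j % 4 = 0
def pvSpecGo : Nat → List String → List String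
  | _, [] => []
  | k, v :: t => (if k % 4 = 0 then pvRotate v else v) :: pvSpecGo (k + 1) t

theorem pvSpecGo_getElem? (vs : List String) : ∀ (k j : Nat),
    (pvSpecGo k vs)[j]? = vs[j]?.map (fun v => if (k + j) % 4 = 0 then pvRotate v else v) := by
  induction vs with
  | nil => intro k j; simp [pvSpecGo]
  | cons v t ih =>
    intro k j
    cases j with
    | zero => simp [pvSpecGo]
    | succ j =>
      simp only [pvSpecGo, List.getElem?_cons_succ, ih (k + 1) j]
      have : k + 1 + j = k + (j + 1) := by omega
      rw [this]

theorem pv_mod4_cast (k : Nat) : PySem.Int.mod (k : Int) 4 = 0 ↔ k % 4 = 0 := by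
  rw [PySem.Int.mod_eq_zero_iff_dvd]
  constructor
  · intro h; omega
  · intro h; omega

-- A accumulates exactly pvSpecGo
theorem pvA_acc (vs : List String) : ∀ (k : Nat) (acc : List String),
    ((PySem.List.enumerate vs (k : Int)).foldl
      (fun predictions iv =>
        if PySem.Int.mod iv.1 4 = 0 then
          if iv.2 = "SUPPORTED" then predictions ++ ["REFUTED"]
          else if iv.2 = "REFUTED" then predictions ++ ["INSUFFICIENT"]
          else predictions ++ ["SUPPORTED"]
        else predictions ++ [iv.2])
      acc) = acc ++ pvSpecGo k vs := by
  induction vs with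
  | nil => intro k acc; simp [PySem.List.enumerate, pvSpecGo]
  | cons v t ih =>
    intro k acc
    rw [PySem.List.enumerate_cons, List.foldl_cons]
    have hcast : (k : Int) + 1 = ((k + 1 : Nat) : Int) := by push_cast; ring
    rw [hcast, ih (k + 1)]
    simp only [pvSpecGo]
    by_cases h4 : k % 4 = 0
    · rw [if_pos ((pv_mod4_cast k).mpr h4), if_pos h4]
      by_cases h1 : v = "SUPPORTED"
      · simp [h1, pvRotate]
      · by_cases h2 : v = "REFUTED"
        · simp [h2, pvRotate]
        · simp [h1, h2, pvRotate]
    · rw [if_neg (fun hc => h4 ((pv_mod4_cast k).mp hc)), if_neg h4]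
      simp

theorem pvA_eq (vs : List String) : simulate_predictions vs = pvSpecGo 0 vs := by
  have := pvA_acc vs 0 []
  simpa [simulate_predictions] using this

-- B's stride loop, characterised element by element
theorem pvB_foldl_get (vs : List String) (j : Nat) : ∀ (R : List Int) (p : List String),
    (∀ i ∈ R, 0 ≤ i ∧ i < (p.length : Int)) →
    ((R.foldl (fun predictions i => predictions.set i.toNat (pvRotate (PySem.List.pyGetD vs i ""))) p)[j]?)
      = if (j : Int) ∈ R then some (pvRotate (PySem.List.pyGetD vs (j : Int) "")) else p[j]? := by
  intro R
  induction R with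
  | nil => intro p _; simp
  | cons i R ih =>
    intro p hb
    rw [List.foldl_cons]
    have hi := hb i (List.mem_cons_self)
    have hlen : (p.set i.toNat (pvRotate (PySem.List.pyGetD vs i ""))).length = p.length := by simp
    have hb' : ∀ x ∈ R, 0 ≤ x ∧ x < (((p.set i.toNat (pvRotate (PySem.List.pyGetD vs i ""))).length : Nat) : Int) := by
      intro x hx; rw [hlen]; exact hb x (List.mem_cons_of_mem _ hx)
    rw [ih _ hb']
    by_cases hjR : (j : Int) ∈ R
    · simp [hjR]
    · by_cases hji : (j : Int) = i
      · have hjt : i.toNat = j := by omega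
        have hjl : j < p.length := by omega
        simp [hji, hjt, hjl]
      · have hm : (j : Int) ∉ (i :: R) := by
          intro hc; rcases List.mem_cons.mp hc with h | h
          · exact hji h
          · exact hjR h
        have hne : i.toNat ≠ j := by omega
        simp [hjR, hm, List.getElem?_set_ne hne]

theorem pvB_eq (vs : List String) : simulate_predictions_alt vs = pvSpecGo 0 vs := by
  apply List.ext_getElem?
  intro j
  have hb : ∀ i ∈ PySem.List.pyRange 0 (vs.length : Int) 4, 0 ≤ i ∧ i < (vs.length : Int) := by
    intro i hi
    have := (PySem.List.mem_pyRange_iff_of_pos (by norm_num) i).mp hi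
    exact ⟨this.1, this.2.1⟩
  rw [simulate_predictions_alt, pvB_foldl_get vs j _ vs hb, pvSpecGo_getElem? vs 0 j]
  have hmem : (j : Int) ∈ PySem.List.pyRange 0 (vs.length : Int) 4 ↔ j < vs.length ∧ j % 4 = 0 := by
    rw [PySem.List.mem_pyRange_iff_of_pos (by norm_num)]
    constructor
    · intro ⟨_, h2, h3⟩; exact ⟨by exact_mod_cast h2, by omega⟩
    · intro ⟨h1, h2⟩; exact ⟨by positivity, by exact_mod_cast h1, by omega⟩
  by_cases hj : j < vs.length
  · by_cases h4 : j % 4 = 0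
    · rw [if_pos (hmem.mpr ⟨hj, h4⟩)]
      rw [PySem.List.pyGetD_natCast, List.getD_eq_getElem?_getD, List.getElem?_eq_getElem hj]
      simp [h4]
    · have : (j : Int) ∉ PySem.List.pyRange 0 (vs.length : Int) 4 := fun hc => h4 (hmem.mp hc).2
      rw [if_neg this, List.getElem?_eq_getElem hj]
      simp [h4]
  · have : (j : Int) ∉ PySem.List.pyRange 0 (vs.length : Int) 4 := fun hc => hj (hmem.mp hc).1
    rw [if_neg this]
    simp [List.getElem?_eq_none (le_of_not_gt hj)]

-- ===== VERDICT (by name: the statement is the Claim_ definition above) =====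
theorem simulate_predictions_spec : Claim_equal_simulate_predictions := by
  intro vs _
  unfold Spec_simulate_predictions
  rw [pvA_eq, pvB_eq]
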